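-- pv_equiv track=rewrite | github.com/Nepommuck/Algorithms | Codeforces/Color-with-Occurrences.py | fill_strict
-- ===== SOURCE A (Python) =====
-- def fill_strict(text, names):
--     best_i = -1
--     best_name = ""
--     for i in range(len(names)):
--         l = len(names[i])
--         if l > len(best_name) and l <= len(text) and text[:l] == names[i]:
--             best_i = i
--             best_name = names[i]
--
--     return best_i
-- ===== SOURCE B (Python) =====
-- def fill_strict(text, names):
--     # Scan the prefixes of text from longest to shortest and return the first
--     # one that occurs in names; names.index gives the earliest such name, which
--     # reproduces A's earliest-among-longest tie-break.
--     for l in range(len(text), 0, -1):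
--         prefix = text[:l]
--         if prefix in names:
--             return names.index(prefix)
--     return -1
-- ===== Notes on version B (the rewrite author's own statement) =====
-- stated objective: alternative
-- what changed: A does an argmax scan over the names with (best_i, best_name) running state; B instead scans the prefixes of text from longest to shortest and returns names.index of the first prefix that occurs in names, which yields the same earliest-among-longest answer.
import Mathlib
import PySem

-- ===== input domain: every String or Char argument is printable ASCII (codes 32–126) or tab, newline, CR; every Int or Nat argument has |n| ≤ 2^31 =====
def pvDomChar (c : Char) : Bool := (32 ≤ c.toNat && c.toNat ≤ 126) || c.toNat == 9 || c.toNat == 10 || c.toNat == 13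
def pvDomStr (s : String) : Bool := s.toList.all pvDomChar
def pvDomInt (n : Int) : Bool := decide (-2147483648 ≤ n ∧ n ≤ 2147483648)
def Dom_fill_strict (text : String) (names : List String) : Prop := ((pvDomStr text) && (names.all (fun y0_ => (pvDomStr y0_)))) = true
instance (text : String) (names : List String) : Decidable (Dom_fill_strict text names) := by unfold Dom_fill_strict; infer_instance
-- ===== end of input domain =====

-- B replaces A's argmax loop over the names by a scan over the PREFIXES of text,
-- longest first, returning names.index of the first prefix present in names;
-- objective: alternative algorithm (same answer, earliest-longest tie-break kept).

-- ===== PORT A =====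
-- for i in range(len(names)): update (best_i, best_name) when
-- len(names[i]) > len(best_name) and len(names[i]) <= len(text) and text[:len(names[i])] == names[i]
def fill_strict (text : String) (names : List String) : Int :=
  ((PySem.List.pyRange 0 (PySem.List.len names) 1).foldl
    (fun st i =>
      if PySem.Str.len st.2 < PySem.Str.len (PySem.List.pyGetD names i "") ∧
         PySem.Str.len (PySem.List.pyGetD names i "") ≤ PySem.Str.len text ∧
         PySem.Str.slice text none (some (PySem.Str.len (PySem.List.pyGetD names i ""))) =
           PySem.List.pyGetD names i ""
      then (i, PySem.List.pyGetD names i "") else st)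
    (-1, "")).1

-- ===== PORT B =====
-- for l in range(len(text), 0, -1): if text[:l] in names: return names.index(text[:l])
def goB (text : String) (names : List String) : List Int → Int
  | [] => -1
  | l :: rest =>
    if names.contains (PySem.Str.slice text none (some l)) then
      match PySem.List.index? names (PySem.Str.slice text none (some l)) with
      | some i => (i : Int)
      | none => -1          -- unreachable: `in` just succeeded
    else goB text names rest

def fill_strict_alt (text : String) (names : List String) : Int :=
  goB text names (PySem.List.pyRange (PySem.Str.len text) 0 (-1))

-- ===== PRECONDITION & SPEC =====
def Spec_fill_strict (text : String) (names : List String) (out : Int) : Prop := out = fill_strict_alt text names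
instance (text : String) (names : List String) (out : Int) : Decidable (Spec_fill_strict text names out) := by unfold Spec_fill_strict; infer_instance

-- ===== CLAIM (what is proved, stated in full; the proofs are below) =====
def Claim_equal_fill_strict : Prop := ∀ (text : String) (names : List String), Dom_fill_strict text names → Spec_fill_strict text names (fill_strict text names)

-- ===== LEMMAS AND PROOFS =====

-- A's update condition, split into the part depending only on the pair (candB)
-- and the strict-improvement comparison
def candB (text : String) (p : Int × String) : Bool :=
  decide (0 < PySem.Str.len p.2) && decide (PySem.Str.len p.2 ≤ PySem.Str.len text) &&
    (PySem.Str.slice text none (some (PySem.Str.len p.2)) == p.2)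

def pureStep (st p : Int × String) : Int × String :=
  if PySem.Str.len st.2 < PySem.Str.len p.2 then p else st

-- the enumerate-style list A's loop walks
def enumL (names : List String) : List (Int × String) :=
  (PySem.List.pyRange 0 (PySem.List.len names) 1).map
    (fun j => (j, PySem.List.pyGetD names j ""))

theorem len_nonneg (s : String) : (0:Int) ≤ PySem.Str.len s := by
  simp [PySem.Str.len_eq]

theorem stepA_eq (text : String) (st p : Int × String) :
    (if PySem.Str.len st.2 < PySem.Str.len p.2 ∧ PySem.Str.len p.2 ≤ PySem.Str.len text ∧
        PySem.Str.slice text none (some (PySem.Str.len p.2)) = p.2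
     then (p.1, p.2) else st)
    = if candB text p = true ∧ PySem.Str.len st.2 < PySem.Str.len p.2 then p else st := by
  have h0 : (0:Int) ≤ PySem.Str.len st.2 := len_nonneg _
  unfold candB
  simp only [Bool.and_eq_true, decide_eq_true_eq, beq_iff_eq]
  by_cases h : PySem.Str.len st.2 < PySem.Str.len p.2 ∧ PySem.Str.len p.2 ≤ PySem.Str.len text ∧
      PySem.Str.slice text none (some (PySem.Str.len p.2)) = p.2
  · rw [if_pos h, if_pos ⟨⟨⟨by omega, h.2.1⟩, h.2.2⟩, h.1⟩]
  · rw [if_neg h, if_neg (fun hc => h ⟨hc.2, hc.1.1.2, hc.1.2⟩)]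

theorem foldl_filter_candB (text : String) :
    ∀ (xs : List (Int × String)) (st : Int × String),
      xs.foldl (fun st p => if candB text p = true ∧ PySem.Str.len st.2 < PySem.Str.len p.2 then p else st) st
      = (xs.filter (candB text)).foldl pureStep st := by
  intro xs
  induction xs with
  | nil => intro st; rfl
  | cons x t ih =>
    intro st
    by_cases hx : candB text x = true
    · rw [List.foldl_cons, List.filter_cons_of_pos hx, List.foldl_cons, ih]
      congr 1
      unfold pureStep
      by_cases h : PySem.Str.len st.2 < PySem.Str.len x.2
      · rw [if_pos ⟨hx, h⟩, if_pos h]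
      · rw [if_neg (fun hc => h hc.2), if_neg h]
    · rw [List.foldl_cons, List.filter_cons_of_neg (by simp [hx]), ih]
      congr 1
      rw [if_neg (fun hc => hx hc.1)]

-- A = first-longest reduction over the candidate list
theorem fillA_eq (text : String) (names : List String) :
    fill_strict text names = (((enumL names).filter (candB text)).foldl pureStep (-1, "")).1 := by
  unfold fill_strict
  rw [← foldl_filter_candB]
  unfold enumL
  rw [List.foldl_map]
  congr 1
  refine List.foldl_ext _ _ _ ?_
  intro st i _
  exact stepA_eq text st (i, PySem.List.pyGetD names i "")

-- foldl pureStep: basic properties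
theorem pure_mem (cs : List (Int × String)) :
    ∀ st, cs.foldl pureStep st = st ∨ cs.foldl pureStep st ∈ cs := by
  induction cs with
  | nil => intro st; exact Or.inl rfl
  | cons c t ih =>
    intro st
    rcases ih (pureStep st c) with h | h
    · rw [List.foldl_cons, h]
      unfold pureStep
      split
      · exact Or.inr (by simp)
      · exact Or.inl rfl
    · exact Or.inr (by simp [List.foldl_cons, h])

theorem pure_mono (cs : List (Int × String)) :
    ∀ st, PySem.Str.len st.2 ≤ PySem.Str.len (cs.foldl pureStep st).2 := by
  induction cs with
  | nil => intro st; simp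
  | cons c t ih =>
    intro st
    refine le_trans ?_ (ih (pureStep st c))
    unfold pureStep
    split <;> omega

theorem pure_max (cs : List (Int × String)) :
    ∀ st c, c ∈ cs → PySem.Str.len c.2 ≤ PySem.Str.len (cs.foldl pureStep st).2 := by
  induction cs with
  | nil => intro st c hc; simp at hc
  | cons a t ih =>
    intro st c hc
    rcases List.mem_cons.mp hc with rfl | hc
    · refine le_trans ?_ (pure_mono t (pureStep st c))
      unfold pureStep
      split <;> omega
    · exact ih _ c hc

theorem pure_ne_gain (cs : List (Int × String)) :
    ∀ st, cs.foldl pureStep st ≠ st → PySem.Str.len st.2 < PySem.Str.len (cs.foldl pureStep st).2 := by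
  induction cs with
  | nil => intro st h; exact absurd rfl h
  | cons c t ih =>
    intro st h
    rw [List.foldl_cons] at h ⊢
    by_cases hf : PySem.Str.len st.2 < PySem.Str.len c.2
    · have hps : pureStep st c = c := by unfold pureStep; rw [if_pos hf]
      rw [hps] at h ⊢
      calc PySem.Str.len st.2 < PySem.Str.len c.2 := hf
        _ ≤ _ := pure_mono t c
    · have hps : pureStep st c = st := by unfold pureStep; rw [if_neg hf]
      rw [hps] at h ⊢
      exact ih st h

-- the result is the FIRST element attaining its length
theorem pure_first (cs : List (Int × String)) :
    ∀ st, cs.foldl pureStep st ≠ st →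
      ∃ pre suf, cs = pre ++ cs.foldl pureStep st :: suf ∧
        ∀ c ∈ pre, PySem.Str.len c.2 < PySem.Str.len (cs.foldl pureStep st).2 := by
  induction cs with
  | nil => intro st h; exact absurd rfl h
  | cons c t ih =>
    intro st h
    rw [List.foldl_cons] at h ⊢
    by_cases hf : PySem.Str.len st.2 < PySem.Str.len c.2
    · have hps : pureStep st c = c := by unfold pureStep; rw [if_pos hf]
      rw [hps] at h ⊢
      by_cases hr : t.foldl pureStep c = c
      · exact ⟨[], t, by rw [hr]; simp, by simp⟩
      · obtain ⟨pre, suf, heq, hlt⟩ := ih c hr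
        refine ⟨c :: pre, suf, by rw [List.cons_append]; exact congrArg _ heq, ?_⟩
        intro x hx
        rcases List.mem_cons.mp hx with rfl | hx
        · exact pure_ne_gain _ _ hr
        · exact hlt x hx
    · have hps : pureStep st c = st := by unfold pureStep; rw [if_neg hf]
      rw [hps] at h ⊢
      obtain ⟨pre, suf, heq, hlt⟩ := ih st h
      refine ⟨c :: pre, suf, by rw [List.cons_append]; exact congrArg _ heq, ?_⟩
      intro x hx
      rcases List.mem_cons.mp hx with rfl | hx
      · have := pure_ne_gain t st h; omega
      · exact hlt x hx

-- membership in the enumerate list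
theorem mem_enumL (names : List String) (p : Int × String) :
    p ∈ enumL names ↔ ∃ j : Nat, ∃ h : j < names.length, p = ((j : Int), names[j]) := by
  unfold enumL
  simp only [List.mem_map, PySem.List.mem_pyRange_one, PySem.List.len_eq]
  constructor
  · rintro ⟨i, ⟨h0, hlt⟩, rfl⟩
    obtain ⟨n, rfl⟩ : ∃ n : Nat, i = (n : Int) := ⟨i.toNat, by omega⟩
    have hlen : n < names.length := by omega
    refine ⟨n, hlen, ?_⟩
    rw [PySem.List.pyGetD_natCast, List.getD_eq_getElem names "" hlen]
  · rintro ⟨j, hj, rfl⟩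
    refine ⟨(j : Int), ⟨by omega, by omega⟩, ?_⟩
    rw [PySem.List.pyGetD_natCast, List.getD_eq_getElem names "" hj]

theorem pairwise_enumL (names : List String) :
    (enumL names).Pairwise (fun p q => p.1 < q.1) := by
  unfold enumL
  exact (PySem.List.pairwise_lt_pyRange_one 0 (PySem.List.len names)).map _ (by intro a b h; simpa using h)

theorem prefix_len (text : String) (l : Int) (h0 : 0 ≤ l) (hL : l ≤ PySem.Str.len text) :
    PySem.Str.len (PySem.Str.slice text none (some l)) = l := by
  rw [PySem.Str.len_eq] at hL ⊢
  rw [PySem.Str.toList_slice, PySem.Chars.slice_eq_listSlice, PySem.List.slice_to _ h0,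
    List.length_take]
  omega

-- a candidate of length l exists ↔ text[:l] occurs in names  (for 0 < l ≤ len text)
theorem contains_iff_cand (text : String) (names : List String) (l : Int)
    (h0 : 0 < l) (hL : l ≤ PySem.Str.len text) :
    names.contains (PySem.Str.slice text none (some l)) = true ↔
      ∃ p ∈ (enumL names).filter (candB text), PySem.Str.len p.2 = l := by
  rw [List.contains_iff_mem]
  constructor
  · intro hmem
    obtain ⟨j, hj, hjv⟩ := List.mem_iff_getElem.mp hmem
    refine ⟨((j : Int), PySem.Str.slice text none (some l)), ?_, prefix_len text l (by omega) hL⟩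
    rw [List.mem_filter]
    refine ⟨(mem_enumL names _).mpr ⟨j, hj, by rw [hjv]⟩, ?_⟩
    unfold candB
    simp only [Bool.and_eq_true, decide_eq_true_eq, beq_iff_eq]
    rw [prefix_len text l (by omega) hL]
    exact ⟨⟨h0, hL⟩, rfl⟩
  · rintro ⟨p, hp, hlen⟩
    rw [List.mem_filter] at hp
    obtain ⟨hpe, hpc⟩ := hp
    unfold candB at hpc
    simp only [Bool.and_eq_true, decide_eq_true_eq, beq_iff_eq] at hpc
    rw [hlen] at hpc
    rw [hpc.2]
    obtain ⟨j, hj, rfl⟩ := (mem_enumL names p).mp hpe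
    exact List.getElem_mem hj

-- one unfolding step of B's loop
theorem goB_cons (text : String) (names : List String) (l : Int) (rest : List Int) :
    goB text names (l :: rest) =
      if names.contains (PySem.Str.slice text none (some l)) then
        match PySem.List.index? names (PySem.Str.slice text none (some l)) with
        | some i => (i : Int)
        | none => -1
      else goB text names rest := rfl

-- B's loop skips every length with no occurrence
theorem goB_skip (text : String) (names : List String) (m : Int) (h0 : 0 ≤ m) :
    ∀ n : Nat,
      (∀ l : Int, m < l → l ≤ m + n → names.contains (PySem.Str.slice text none (some l)) = false) →
      goB text names (PySem.List.pyRange (m + n) 0 (-1)) = goB text names (PySem.List.pyRange m 0 (-1)) := by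
  intro n
  induction n with
  | zero => intro _; norm_num
  | succ k ih =>
    intro h
    have hcast : (m + ((k:Nat)+1 : Nat) : Int) = (m + k) + 1 := by push_cast; ring
    rw [hcast, PySem.List.pyRange_neg_one_cons (by omega : (0:Int) < (m + k) + 1), goB_cons,
      h ((m+k)+1) (by omega) (by omega)]
    simp only [Bool.false_eq_true, if_false]
    have : ((m + k) + 1 - 1 : Int) = m + (k : Nat) := by omega
    rw [this]
    exact ih (fun l hl1 hl2 => h l hl1 (by omega))

-- index? finds exactly A's best index
theorem index?_of_first (names : List String) (j : Nat) (hj : j < names.length)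
    (hfirst : ∀ k : Nat, ∀ hk : k < names.length, k < j → names[k] ≠ names[j]) :
    PySem.List.index? names names[j] = some j := by
  rw [PySem.List.index?_eq_some_iff]
  refine ⟨names.take j, names.drop (j+1), ?_, by simp [List.length_take]; omega, ?_⟩
  · conv_lhs => rw [← List.take_append_drop j names]
    congr 1
    rw [List.drop_eq_getElem_cons hj]
  · intro hmem
    obtain ⟨k, hk, hkv⟩ := List.mem_iff_getElem.mp hmem
    rw [List.length_take] at hk
    have hkj : k < j := by omega
    have hkn : k < names.length := by omega
    rw [List.getElem_take] at hkv
    exact hfirst k hkn hkj hkv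

theorem fill_strict_eq_alt (text : String) (names : List String) :
    fill_strict text names = fill_strict_alt text names := by
  have hLt : (0:Int) ≤ PySem.Str.len text := len_nonneg text
  set cs := (enumL names).filter (candB text) with hcs
  set r := cs.foldl pureStep (-1, "") with hr
  have hA : fill_strict text names = r.1 := fillA_eq text names
  unfold fill_strict_alt
  by_cases hne : r = (-1, "")
  · -- no candidate: every length 1..len(text) is absent from names
    have hnone : ∀ l : Int, 0 < l → l ≤ PySem.Str.len text →
        names.contains (PySem.Str.slice text none (some l)) = false := by
      intro l h0 hL
      by_contra h
      rw [Bool.not_eq_false] at h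
      obtain ⟨p, hp, hplen⟩ := (contains_iff_cand text names l h0 hL).mp h
      have hle := pure_max cs (-1, "") p hp
      rw [← hr, hne] at hle
      have : PySem.Str.len (((-1 : Int), ("" : String)).2) = 0 := by
        simp [PySem.Str.len_eq]
      omega
    have hsk := goB_skip text names 0 le_rfl (PySem.Str.len text).toNat
      (by intro l h1 h2; exact hnone l h1 (by omega))
    rw [show ((0:Int) + ((PySem.Str.len text).toNat : Int)) = PySem.Str.len text by omega] at hsk
    rw [hsk, hA, hne]
    rfl
  · -- a candidate exists; r is the first longest one
    have hmem : r ∈ cs := (pure_mem cs (-1, "")).resolve_left hne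
    have hcand : candB text r = true := (List.mem_filter.mp hmem).2
    unfold candB at hcand
    simp only [Bool.and_eq_true, decide_eq_true_eq, beq_iff_eq] at hcand
    obtain ⟨⟨hm0, hmL⟩, hslice⟩ := hcand
    -- skip all lengths above len r.2
    have hnone : ∀ l : Int, PySem.Str.len r.2 < l → l ≤ PySem.Str.len text →
        names.contains (PySem.Str.slice text none (some l)) = false := by
      intro l h1 h2
      by_contra h
      rw [Bool.not_eq_false] at h
      obtain ⟨p, hp, hplen⟩ := (contains_iff_cand text names l (by omega) h2).mp h
      have := pure_max cs (-1, "") p hp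
      rw [← hr] at this
      omega
    have hskip := goB_skip text names (PySem.Str.len r.2) (by omega)
      (PySem.Str.len text - PySem.Str.len r.2).toNat
      (by intro l hl1 hl2; exact hnone l hl1 (by omega))
    rw [show (PySem.Str.len r.2 + ((PySem.Str.len text - PySem.Str.len r.2).toNat : Int))
        = PySem.Str.len text by omega] at hskip
    rw [hskip, hA]
    obtain ⟨j, hj, hrj⟩ := (mem_enumL names r).mp (List.mem_filter.mp hmem).1
    have hcont : names.contains (PySem.Str.slice text none (some (PySem.Str.len r.2))) = true := by
      rw [hslice, List.contains_iff_mem, hrj]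
      exact List.getElem_mem hj
    rw [PySem.List.pyRange_neg_one_cons (by omega : (0:Int) < PySem.Str.len r.2), goB_cons, hcont]
    simp only [if_true]
    -- j is the first index whose name equals names[j] = r.2
    have hfirst : ∀ k : Nat, ∀ hk : k < names.length, k < j → names[k] ≠ names[j] := by
      intro k hk hkj hkeq
      have hpmem : ((k : Int), names[k]) ∈ cs := by
        rw [hcs, List.mem_filter]
        refine ⟨(mem_enumL names _).mpr ⟨k, hk, rfl⟩, ?_⟩
        have h2eq : names[k] = r.2 := by rw [hkeq, hrj]
        show candB text ((k : Int), names[k]) = true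
        have : candB text ((k : Int), names[k]) = candB text r := by
          unfold candB
          rw [show (((k : Int), names[k]) : Int × String).2 = r.2 from h2eq]
        rw [this]
        exact (List.mem_filter.mp hmem).2
      obtain ⟨pre, suf, heq, hlt⟩ := pure_first cs (-1, "") (by rw [← hr]; exact hne)
      rw [← hr] at heq hlt
      have hnotpre : ((k : Int), names[k]) ∉ pre := by
        intro hin
        have hl := hlt _ hin
        have h2eq : names[k] = r.2 := by rw [hkeq, hrj]
        rw [show (((k : Int), names[k]) : Int × String).2 = r.2 from h2eq] at hl
        omega
      have hpw : cs.Pairwise (fun p q => p.1 < q.1) :=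
        List.Pairwise.sublist List.filter_sublist (pairwise_enumL names)
      rw [heq] at hpw
      have hsuf : ((k : Int), names[k]) ∈ suf := by
        have hin : ((k : Int), names[k]) ∈ pre ++ r :: suf := heq ▸ hpmem
        rcases List.mem_append.mp hin with h | h
        · exact absurd h hnotpre
        · rcases List.mem_cons.mp h with h | h
          · exfalso
            have : (((k : Int), names[k]) : Int × String).1 = r.1 := by rw [h]
            rw [hrj] at this
            simp only at this
            omega
          · exact h
      have hps := (List.pairwise_append.mp hpw).2.1
      have hlt2 := (List.pairwise_cons.mp hps).1 _ hsuf
      rw [hrj] at hlt2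
      simp only at hlt2
      omega
    have hr2 : PySem.Str.slice text none (some (PySem.Str.len r.2)) = names[j] := by
      rw [hslice, hrj]
    rw [hr2, index?_of_first names j hj hfirst, hrj]

-- ===== VERDICT (by name: the statement is the Claim_ definition above) =====
theorem fill_strict_spec : Claim_equal_fill_strict := by
  intro text names _
  unfold Spec_fill_strict
  exact fill_strict_eq_alt text names
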